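-- pv_equiv track=rewrite | github.com/valquiriastorer/alinhamento | alinhamento.py | gera_n_gaps
-- ===== SOURCE A (Python) =====
-- GAP = '_'
--
-- def gera_gaps( dna ):
--     ''' ( str ) -> list
--
--     RECEBE uma string `dna` representando uma fita de DNA com os
--     símbolos 'A', 'T', 'C', 'G' e '_' (GAP).
--
--     RETORNA uma lista com todas as variações de dna com um símbolo GAP
--     a mais e sem repetições.
--
--     exemplos:
--     In  [1]: gera_gaps( 'T' )
--     Out [1]: ['_T', 'T_']
--
--     In  [2]: gera_gaps( 'CA' )
--     Out [2]: ['_CA', 'C_A', 'CA_']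
--
--     In  [3]: gera_gaps( 'AT_G')
--     Out [3]: ['_AT_G', 'A_T_G', 'AT__G', 'AT_G_']
--     '''
--     # modifique o código abaixo para conter a sua solução.
--     variações = []
--     n = len(dna)
--     i = 0 #contador para marcar o momento de colocar o gap
--     while i <= n:
--         dna_gap = ''
--         for j in range(n): #construo a string caractere a caractere
--             if j == i:
--                 dna_gap += GAP
--             dna_gap += dna[j]
--         if i == n: #para o GAP ir após o dna
--             dna_gap += GAP
--         if dna_gap not in variações:
--             variações += [dna_gap]
--         i += 1
--
--     return variações
--
-- def gera_n_gaps( dna, n=1 ):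
--     '''( str, int ) -> list
--
--     RECEBE uma string `dna` representando uma fita de DNA com os
--     símbolos 'A', 'T', 'C', 'G' e '_' (gap), e um número inteiro positivo `n`.
--
--     RETORNA uma lista sem repetições com todas as variações de `dna`
--     com até `n` gaps extras.
--
--     EXEMPLOS:
--
--     In [1]: gera_n_gaps( 'T', 2 )
--     Out[1]: ['T', '_T', 'T_', '__T', '_T_', 'T__']
--
--     In [2]: gera_n_gaps( 'CA', 2 )
--     Out[2]: ['CA', '_CA', 'C_A', 'CA_', '__CA', '_C_A', '_CA_', 'C__A', 'C_A_', 'CA__']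
--
--     In [3]: gera_n_gaps( 'C_A', 2)
--     Out[3]: ['C_A', '_C_A', 'C__A', 'C_A_', '__C_A', '_C__A', '_C_A_', 'C___A', 'C__A_', 'C_A__']
--     '''
--     # modifique o código abaixo para conter a sua solução.
--     variações = []
--
--     for n_gaps in range(n+1):
--         if n_gaps == 0:
--             variações += [dna]
--         elif n_gaps == 1:
--             variações += gera_gaps(dna)
--         else:
--             n_var = len(variações)
--             for i in range(1, n_var):
--                variações += gera_gaps(variações[i])
--
--     var_n = []
--     n_var = len(variações)
--     for j in range(n_var):
--         if variações[j] not in var_n: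
--             var_n += [variações[j]]
--     return var_n
-- ===== SOURCE B (Python) =====
-- GAP = '_'
--
-- def gera_n_gaps(dna, n=1):
--     result = [dna]
--     seen = {dna}
--     frontier = [dna]
--     for _ in range(n):
--         next_frontier = []
--         for s in frontier:
--             for i in range(len(s) + 1):
--                 t = s[:i] + GAP + s[i:]
--                 if t not in seen:
--                     seen.add(t)
--                     result.append(t)
--                     next_frontier.append(t)
--         frontier = next_frontier
--     return result
-- ===== Notes on version B (the rewrite author's own statement) =====
-- stated objective: alternative
-- what changed: B does a level-by-level BFS that expands only the new frontier of each round under a seen-set, instead of A's re-expansion of the whole accumulated list every round with list-membership dedup passes and a final dedup pass.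
-- outside the precondition, e.g. on gera_n_gaps('T', -1): A returns [], B returns ['T']
import Mathlib
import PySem

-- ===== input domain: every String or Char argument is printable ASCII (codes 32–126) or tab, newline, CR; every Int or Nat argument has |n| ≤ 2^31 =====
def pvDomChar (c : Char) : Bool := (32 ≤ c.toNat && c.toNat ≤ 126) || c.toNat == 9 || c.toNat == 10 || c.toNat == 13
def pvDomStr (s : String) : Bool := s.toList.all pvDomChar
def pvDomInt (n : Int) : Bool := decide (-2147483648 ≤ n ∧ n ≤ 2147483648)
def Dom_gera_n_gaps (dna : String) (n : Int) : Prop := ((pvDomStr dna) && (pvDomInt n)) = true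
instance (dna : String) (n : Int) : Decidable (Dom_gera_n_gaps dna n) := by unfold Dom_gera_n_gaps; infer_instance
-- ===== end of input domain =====

-- B is a level-by-level BFS with a seen-set that expands only the new frontier of each round,
-- instead of A's re-expansion of the whole accumulated list followed by a final dedup pass.

-- ===== PORT A =====
-- gera_gaps, inner loop: dna_gap built character by character (for j in range(n), GAP inserted when j == i)
def pvGGBuild (dna : List Char) (i : Nat) : List Char :=
  (PySem.List.pyRange 0 (dna.length : Int) 1).foldl
    (fun acc j => (if j = (i : Int) then acc ++ ['_'] else acc) ++ [PySem.List.pyGetD dna j ' ']) []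

-- gera_gaps, while i <= n loop collecting the variations without repetitions
def pvGGLoop (dna : List Char) (i : Nat) (acc : List (List Char)) : List (List Char) :=
  if i ≤ dna.length then
    let g := if i = dna.length then pvGGBuild dna i ++ ['_'] else pvGGBuild dna i
    pvGGLoop dna (i + 1) (if g ∈ acc then acc else acc ++ [g])
  else acc
termination_by dna.length + 1 - i

def pvGeraGaps (dna : List Char) : List (List Char) := pvGGLoop dna 0 []

def gera_n_gaps (dna : String) (n : Int) : List String :=
  let d := dna.toList
  let vari := (PySem.List.pyRange 0 (n + 1) 1).foldl (fun V k =>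
    if k = 0 then V ++ [d]
    else if k = 1 then V ++ pvGeraGaps d
    else
      -- for i in range(1, n_var): variações += gera_gaps(variações[i]);
      -- the indices 1..n_var-1 address the prefix V existing before the loop, unchanged by the appends
      let nvar : Int := V.length
      (PySem.List.pyRange 1 nvar 1).foldl (fun W i => W ++ pvGeraGaps (PySem.List.pyGetD V i [])) V) []
  -- final dedup pass: for j in range(n_var): if variações[j] not in var_n: var_n += [variações[j]]
  (vari.foldl (fun acc x => if x ∈ acc then acc else acc ++ [x]) []).map String.mk

-- ===== PORT B =====
-- BFS: result/seen/frontier, n rounds, each round expands only the frontier.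
-- t = s[:i] + '_' + s[i:] with 0 ≤ i ≤ len(s): the slices are exactly take i / drop i.
def gera_n_gaps_alt (dna : String) (n : Int) : List String :=
  let d := dna.toList
  let st := (List.range n.toNat).foldl
    (fun (st : List (List Char) × PySem.Set (List Char) × List (List Char)) _ =>
      let (res, seen, frontier) := st
      let (res, seen, next) := frontier.foldl
        (fun st2 s =>
          (List.range (s.length + 1)).foldl
            (fun st3 i =>
              let t := s.take i ++ '_' :: s.drop i
              if PySem.Set.contains st3.2.1 t then st3
              else (st3.1 ++ [t], PySem.Set.add st3.2.1 t, st3.2.2 ++ [t]))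
            st2)
        (res, seen, ([] : List (List Char)))
      (res, seen, next))
    ([d], PySem.Set.ofList [d], [d])
  st.1.map String.mk

-- ===== PRECONDITION & SPEC =====
-- Pre_ excludes negative n, which is outside the function's stated domain ('um número inteiro
-- positivo n'): no behaviour is specified for a negative gap count, and A ([]) and B ([dna])
-- read that unspecified corner differently.
def Pre_gera_n_gaps (dna : String) (n : Int) : Prop := 0 ≤ n
instance (dna : String) (n : Int) : Decidable (Pre_gera_n_gaps dna n) := by unfold Pre_gera_n_gaps; infer_instance
def pvWitness_gera_n_gaps : String × Int := ("CA", 2)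

def Spec_gera_n_gaps (dna : String) (n : Int) (out : List String) : Prop := out = gera_n_gaps_alt dna n
instance (dna : String) (n : Int) (out : List String) : Decidable (Spec_gera_n_gaps dna n out) := by unfold Spec_gera_n_gaps; infer_instance

-- ===== CLAIM (what is proved, stated in full; the proofs are below) =====
def Claim_equal_gera_n_gaps : Prop := ∀ (dna : String) (n : Int), Dom_gera_n_gaps dna n → Pre_gera_n_gaps dna n → Spec_gera_n_gaps dna n (gera_n_gaps dna n)

-- ===== LEMMAS AND PROOFS =====

-- insertion of '_' at position i, and all insertions into s (raw, with multiplicity)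
def pvIns (s : List Char) (i : Nat) : List Char := s.take i ++ '_' :: s.drop i
def pvInsAll (s : List Char) : List (List Char) := (List.range (s.length + 1)).map (pvIns s)

-- level k: all strings obtained from d by exactly k insertions (raw); U k: levels 0..k concatenated
def pvM (d : List Char) : Nat → List (List Char)
  | 0 => [d]
  | k + 1 => (pvM d k).flatMap pvInsAll
def pvU (d : List Char) (k : Nat) : List (List Char) := (List.range (k + 1)).flatMap (pvM d)

-- first occurrences of l relative to an already-seen set S
def pvDed {α : Type} [DecidableEq α] (S : List α) : List α → List α
  | [] => []
  | a :: l => if a ∈ S then pvDed S l else a :: pvDed (a :: S) l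

-- the new strings of level k, in first-appearance order
def pvN (d : List Char) : Nat → List (List Char)
  | 0 => [d]
  | k + 1 => pvDed (pvU d k) (pvM d (k + 1))

-- A's accumulated list after processing gap counts 0..k
def pvAV (d : List Char) : Nat → List (List Char)
  | 0 => [d]
  | 1 => [d] ++ pvGeraGaps d
  | k + 2 => pvAV d (k + 1) ++ (pvAV d (k + 1) |>.drop 1).flatMap pvGeraGaps

-- ---- generic pvDed lemmas ----
theorem pvDed_congr {α : Type} [DecidableEq α] (l : List α) : ∀ (S T : List α),
    (∀ x, x ∈ S ↔ x ∈ T) → pvDed S l = pvDed T l := by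
  induction l with
  | nil => intro S T _; rfl
  | cons a l ih =>
    intro S T h
    simp only [pvDed]
    by_cases ha : a ∈ S
    · rw [if_pos ha, if_pos ((h a).1 ha)]; exact ih S T h
    · rw [if_neg ha, if_neg (fun hT => ha ((h a).2 hT))]
      exact congrArg _ (ih (a :: S) (a :: T) (by intro x; simp [List.mem_cons, h x]))

theorem pvMem_ded {α : Type} [DecidableEq α] {x : α} (l : List α) : ∀ (S : List α),
    (x ∈ pvDed S l ↔ x ∈ l ∧ x ∉ S) := by
  induction l with
  | nil => intro S; simp [pvDed]
  | cons a l ih =>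
    intro S
    simp only [pvDed]
    by_cases ha : a ∈ S
    · rw [if_pos ha, ih]
      constructor
      · rintro ⟨hx, hxS⟩; exact ⟨List.mem_cons_of_mem _ hx, hxS⟩
      · rintro ⟨hx, hxS⟩
        rcases List.mem_cons.1 hx with rfl | hx
        · exact absurd ha hxS
        · exact ⟨hx, hxS⟩
    · rw [if_neg ha]
      simp only [List.mem_cons, ih, List.mem_cons]
      constructor
      · rintro (rfl | ⟨hx, hxS⟩)
        · exact ⟨Or.inl rfl, ha⟩
        · exact ⟨Or.inr hx, fun hS => hxS (Or.inr hS)⟩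
      · rintro ⟨rfl | hx, hxS⟩
        · exact Or.inl rfl
        · by_cases hxa : x = a
          · exact Or.inl hxa
          · exact Or.inr ⟨hx, fun h => h.elim hxa hxS⟩

theorem pvDed_append {α : Type} [DecidableEq α] (l₁ : List α) : ∀ (S l₂ : List α),
    pvDed S (l₁ ++ l₂) = pvDed S l₁ ++ pvDed (l₁ ++ S) l₂ := by
  induction l₁ with
  | nil => intro S l₂; simp [pvDed]
  | cons a l₁ ih =>
    intro S l₂
    simp only [List.cons_append, pvDed]
    split_ifs with ha
    · rw [ih]
      refine congrArg _ (pvDed_congr _ _ _ ?_)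
      intro x; simp only [List.mem_append, List.mem_cons]
      constructor
      · exact Or.inr
      · rintro (rfl | h)
        · exact Or.inr ha
        · exact h
    · rw [ih, List.cons_append]
      refine congrArg _ (congrArg _ (pvDed_congr _ _ _ ?_))
      intro x; simp only [List.mem_append, List.mem_cons]; tauto

theorem pvDed_nil {α : Type} [DecidableEq α] (l : List α) : ∀ (S : List α),
    (∀ x ∈ l, x ∈ S) → pvDed S l = [] := by
  induction l with
  | nil => intro S _; rfl
  | cons a l ih =>
    intro S h
    simp only [pvDed, if_pos (h a List.mem_cons_self)]
    exact ih S fun x hx => h x (List.mem_cons_of_mem _ hx)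

theorem pvDed_ded {α : Type} [DecidableEq α] (l : List α) : ∀ (S T : List α),
    (∀ x ∈ T, x ∈ S) → pvDed S (pvDed T l) = pvDed S l := by
  induction l with
  | nil => intro S T _; rfl
  | cons a l ih =>
    intro S T h
    simp only [pvDed]
    by_cases haT : a ∈ T
    · rw [if_pos haT, if_pos (h a haT)]; exact ih S T h
    · rw [if_neg haT]
      by_cases haS : a ∈ S
      · simp only [pvDed, if_pos haS]
        exact ih S (a :: T) (by
          intro x hx; rcases List.mem_cons.1 hx with rfl | hx
          · exact haS
          · exact h x hx)
      · simp only [pvDed, if_neg haS]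
        refine congrArg _ (ih (a :: S) (a :: T) ?_)
        intro x hx
        rcases List.mem_cons.1 hx with rfl | hx
        · exact List.mem_cons_self
        · exact List.mem_cons_of_mem _ (h x hx)

theorem pvFoldl_dedup (l : List (List Char)) : ∀ (acc : List (List Char)),
    l.foldl (fun a x => if x ∈ a then a else a ++ [x]) acc = acc ++ pvDed acc l := by
  induction l with
  | nil => intro acc; simp [pvDed]
  | cons a l ih =>
    intro acc
    simp only [List.foldl_cons, pvDed]
    by_cases ha : a ∈ acc
    · rw [if_pos ha, if_pos ha, ih]
    · rw [if_neg ha, if_neg ha, ih, List.append_assoc]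
      refine congrArg _ ?_
      have := pvDed_congr l (acc ++ [a]) (a :: acc)
        (by intro x; simp only [List.mem_append, List.mem_cons]; tauto)
      simp only [List.singleton_append] at this ⊢
      rw [this]

theorem pvDed_flatMap_dedin {α : Type} [DecidableEq α] (l : List α) (f : α → List α) :
    ∀ (S : List α), pvDed S (l.flatMap (fun x => pvDed [] (f x))) = pvDed S (l.flatMap f) := by
  induction l with
  | nil => intro S; rfl
  | cons a l ih =>
    intro S
    simp only [List.flatMap_cons, pvDed_append]
    rw [pvDed_ded (f a) S [] (by simp)]
    refine congrArg _ ?_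
    rw [pvDed_congr (l.flatMap (fun x => pvDed [] (f x))) (pvDed [] (f a) ++ S) (f a ++ S)
        (by intro x; simp [List.mem_append, pvMem_ded])]
    exact ih (f a ++ S)

theorem pvDed_flatMap_ded {α : Type} [DecidableEq α] (l : List α) (f : α → List α) :
    ∀ (S₀ S : List α), (∀ x ∈ S₀, ∀ t ∈ f x, t ∈ S) →
    pvDed S ((pvDed S₀ l).flatMap f) = pvDed S (l.flatMap f) := by
  induction l with
  | nil => intro S₀ S _; rfl
  | cons a l ih =>
    intro S₀ S h
    simp only [pvDed, List.flatMap_cons]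
    by_cases ha : a ∈ S₀
    · rw [if_pos ha, pvDed_append, pvDed_nil (f a) S (h a ha), List.nil_append]
      rw [pvDed_congr (l.flatMap f) (f a ++ S) S (by
        intro x; simp only [List.mem_append]
        constructor
        · rintro (hx | hx); exact h a ha x hx; exact hx
        · exact Or.inr)]
      exact ih S₀ S h
    · rw [if_neg ha]
      simp only [List.flatMap_cons, pvDed_append]
      refine congrArg _ ?_
      exact ih (a :: S₀) (f a ++ S) (by
        intro x hx t ht
        rcases List.mem_cons.1 hx with rfl | hx
        · exact List.mem_append.2 (Or.inl ht)
        · exact List.mem_append.2 (Or.inr (h x hx t ht)))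

-- ---- level lemmas ----
theorem pvLength_mem_insAll {s t : List Char} (h : t ∈ pvInsAll s) : t.length = s.length + 1 := by
  rcases List.mem_map.1 h with ⟨i, hi, rfl⟩
  have : i ≤ s.length := by simpa [Nat.lt_succ_iff] using List.mem_range.1 hi
  simp [pvIns]

theorem pvLength_mem_M {d x : List Char} {k : Nat} (h : x ∈ pvM d k) : x.length = d.length + k := by
  induction k generalizing x with
  | zero => simp [pvM] at h; simp [h]
  | succ k ih =>
    rcases List.mem_flatMap.1 h with ⟨y, hy, hx⟩
    have := ih hy
    have := pvLength_mem_insAll hx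
    omega

theorem pvMem_U {d x : List Char} {k : Nat} : x ∈ pvU d k ↔ ∃ j, j ≤ k ∧ x ∈ pvM d j := by
  simp [pvU, List.mem_flatMap, List.mem_range, Nat.lt_succ_iff]

theorem pvU_succ (d : List Char) (k : Nat) : pvU d (k + 1) = pvU d k ++ pvM d (k + 1) := by
  simp [pvU, List.range_succ]

theorem pvN_succ (d : List Char) (k : Nat) :
    pvN d (k + 1) = pvDed (pvU d k) ((pvN d k).flatMap pvInsAll) := by
  cases k with
  | zero => rfl
  | succ k =>
    show pvDed (pvU d (k+1)) ((pvM d (k+1)).flatMap pvInsAll) = _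
    rw [show pvN d (k+1) = pvDed (pvU d k) (pvM d (k+1)) from rfl]
    rw [pvDed_flatMap_ded (pvM d (k+1)) pvInsAll (pvU d k) (pvU d (k+1)) (by
      intro x hx t ht
      rcases pvMem_U.1 hx with ⟨j, hj, hx⟩
      exact pvMem_U.2 ⟨j+1, by omega, List.mem_flatMap.2 ⟨x, hx, ht⟩⟩)]

-- ---- gera_gaps = pvDed [] (pvInsAll d) ----
theorem pvGGBuild_eq_enum (dna : List Char) (i : Nat) :
    pvGGBuild dna i = (PySem.List.enumerate dna 0).foldl
      (fun acc p => (if p.1 = (i : Int) then acc ++ ['_'] else acc) ++ [p.2]) [] := by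
  rw [pvGGBuild, PySem.List.enumerate_eq_map_pyRange dna ' ', List.foldl_map]
  rfl

theorem pvGGBuild_gen (i : Nat) (l : List Char) : ∀ (s : Int) (acc : List Char),
    (PySem.List.enumerate l s).foldl
      (fun acc p => (if p.1 = (i : Int) then acc ++ ['_'] else acc) ++ [p.2]) acc =
    acc ++ (if s ≤ (i : Int) ∧ (i : Int) < s + l.length then
      l.take ((i : Int) - s).toNat ++ '_' :: l.drop ((i : Int) - s).toNat else l) := by
  induction l with
  | nil =>
    intro s acc
    rw [PySem.List.enumerate_nil, List.foldl_nil,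
      if_neg (by simp only [List.length_nil]; push_cast; omega)]
    simp
  | cons c l ih =>
    intro s acc
    rw [PySem.List.enumerate_cons, List.foldl_cons]
    by_cases hs : s = (i : Int)
    · rw [if_pos (by simpa using hs), ih]
      rw [if_neg (by push_cast; omega)]
      rw [if_pos (by simp only [List.length_cons]; push_cast; omega)]
      rw [show ((i : Int) - s).toNat = 0 from by omega]
      simp
    · rw [if_neg (by simpa using hs), ih]
      by_cases hin : s + 1 ≤ (i : Int) ∧ (i : Int) < s + 1 + l.length
      · rw [if_pos hin,
          if_pos (by simp only [List.length_cons] at hin ⊢; push_cast at hin ⊢; omega)]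
        rw [show ((i : Int) - s).toNat = ((i : Int) - (s + 1)).toNat + 1 from by omega]
        simp
      · rw [if_neg hin,
          if_neg (by simp only [List.length_cons] at hin ⊢; push_cast at hin ⊢; omega)]
        simp

theorem pvGGBuild_lt {dna : List Char} {i : Nat} (h : i < dna.length) :
    pvGGBuild dna i = pvIns dna i := by
  rw [pvGGBuild_eq_enum, pvGGBuild_gen, if_pos (by constructor <;> [omega; exact_mod_cast by omega])]
  simp [pvIns]

theorem pvGGBuild_ge {dna : List Char} {i : Nat} (h : dna.length ≤ i) :
    pvGGBuild dna i = dna := by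
  rw [pvGGBuild_eq_enum, pvGGBuild_gen, if_neg (by push_cast; omega)]
  simp

theorem pvGGLoop_eq (dna : List Char) :
    ∀ (m i : Nat) (acc : List (List Char)), i + m = dna.length + 1 →
    pvGGLoop dna i acc =
      ((List.range' i m).map (pvIns dna)).foldl (fun a x => if x ∈ a then a else a ++ [x]) acc := by
  intro m
  induction m with
  | zero =>
    intro i acc hi
    rw [pvGGLoop, if_neg (by omega)]
    simp
  | succ m ih =>
    intro i acc hi
    rw [pvGGLoop, if_pos (by omega)]
    have hg : (if i = dna.length then pvGGBuild dna i ++ ['_'] else pvGGBuild dna i) = pvIns dna i := by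
      by_cases h : i = dna.length
      · subst h; rw [if_pos rfl, pvGGBuild_ge le_rfl]; simp [pvIns]
      · rw [if_neg h, pvGGBuild_lt (by omega)]
    rw [hg, ih (i+1) _ (by omega), List.range'_succ]
    simp

theorem pvGeraGaps_eq (dna : List Char) : pvGeraGaps dna = pvDed [] (pvInsAll dna) := by
  rw [pvGeraGaps, pvGGLoop_eq dna (dna.length + 1) 0 [] (by omega)]
  rw [show List.range' 0 (dna.length + 1) = List.range (dna.length + 1) from List.range_eq_range'.symm]
  exact (pvFoldl_dedup (List.map (pvIns dna) (List.range (dna.length + 1))) []).trans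
    (by rw [List.nil_append]; rfl)

-- ---- A's accumulated list: the invariant ----
theorem pvAV_one (d : List Char) : pvAV d 1 = d :: pvDed [] (pvInsAll d) := by
  simp [pvAV, pvGeraGaps_eq]

theorem pvU_mono {d x : List Char} {j k : Nat} (h : j ≤ k) (hx : x ∈ pvU d j) : x ∈ pvU d k := by
  rcases pvMem_U.1 hx with ⟨i, hi, hx⟩
  exact pvMem_U.2 ⟨i, by omega, hx⟩

theorem pvU_insAll {d x t : List Char} {k : Nat} (hx : x ∈ pvU d k) (ht : t ∈ pvInsAll x) :
    t ∈ pvU d (k + 1) := by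
  rcases pvMem_U.1 hx with ⟨j, hj, hx⟩
  exact pvMem_U.2 ⟨j + 1, by omega, List.mem_flatMap.2 ⟨x, hx, ht⟩⟩

theorem pvMem_geraGaps {s x : List Char} : x ∈ pvGeraGaps s ↔ x ∈ pvInsAll s := by
  rw [pvGeraGaps_eq]
  simp [pvMem_ded]

theorem pvA_invariant (d : List Char) (m : Nat) :
    pvAV d (m + 1) = d :: (pvAV d (m + 1)).drop 1 ∧
    (∀ x, x ∈ pvAV d (m + 1) ↔ x ∈ pvU d (m + 1)) ∧
    pvDed (pvU d m) ((pvAV d (m + 1)).drop 1) = pvN d (m + 1) ∧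
    pvDed [] (pvAV d (m + 1)) = pvDed [] (pvU d (m + 1)) := by
  have hU0 : pvU d 0 = [d] := rfl
  have hM1 : pvM d 1 = pvInsAll d := by simp [pvM]
  induction m with
  | zero =>
    refine ⟨by rw [pvAV_one]; rfl, ?_, ?_, ?_⟩
    · intro x
      rw [pvAV_one, pvU_succ, hU0, hM1]
      simp [pvMem_ded]
    · rw [pvAV_one]
      show pvDed (pvU d 0) (pvDed [] (pvInsAll d)) = pvDed (pvU d 0) (pvM d 1)
      rw [hU0, hM1, pvDed_ded _ [d] [] (by simp)]
    · rw [pvAV_one, pvU_succ, hU0, pvDed_append]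
      have hL : pvDed ([] : List (List Char)) (d :: pvDed [] (pvInsAll d)) =
          d :: pvDed [d] (pvDed [] (pvInsAll d)) := by
        simp [pvDed]
      rw [hL, pvDed_ded _ [d] [] (by simp)]
      rw [show pvDed ([] : List (List Char)) [d] = [d] from by simp [pvDed]]
      rw [pvDed_congr (pvM d (0 + 1)) ([d] ++ []) [d] (by simp)]
      rw [show pvM d (0 + 1) = pvInsAll d from hM1]
      rfl
  | succ m ih =>
    obtain ⟨hhead, ha, hb, hc⟩ := ih
    have htsub : ∀ x ∈ (pvAV d (m + 1)).drop 1, x ∈ pvU d (m + 1) := by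
      intro x hx
      exact (ha x).1 (List.mem_of_mem_drop hx)
    have hside : ∀ x ∈ pvU d m, ∀ s ∈ pvInsAll x, s ∈ pvU d (m + 1) := by
      intro x hx s hs
      exact pvU_insAll hx hs
    have hXdef : pvAV d (m + 2) =
        pvAV d (m + 1) ++ ((pvAV d (m + 1)).drop 1).flatMap pvGeraGaps := rfl
    -- the new elements contributed by the (m+2)-th round, relative to everything seen
    have hkey : pvDed (pvU d (m + 1)) (((pvAV d (m + 1)).drop 1).flatMap pvGeraGaps) =
        pvN d (m + 2) := by
      have h1 : pvGeraGaps = fun s => pvDed [] (pvInsAll s) := funext pvGeraGaps_eq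
      rw [h1, pvDed_flatMap_dedin]
      rw [← pvDed_flatMap_ded ((pvAV d (m + 1)).drop 1) pvInsAll (pvU d m) (pvU d (m + 1)) hside]
      rw [hb, ← pvN_succ]
    have hdrop : (pvAV d (m + 2)).drop 1 =
        (pvAV d (m + 1)).drop 1 ++ ((pvAV d (m + 1)).drop 1).flatMap pvGeraGaps := by
      rw [hXdef]
      conv_lhs => rw [hhead]
      rfl
    refine ⟨?_, ?_, ?_, ?_⟩
    · rw [hdrop, hXdef]
      conv_lhs => rw [hhead]
      simp
    · intro x
      rw [hXdef]
      constructor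
      · intro hx
        rcases List.mem_append.1 hx with hx | hx
        · exact pvU_mono (by omega) ((ha x).1 hx)
        · rcases List.mem_flatMap.1 hx with ⟨y, hy, hxy⟩
          exact pvU_insAll (htsub y hy) (pvMem_geraGaps.1 hxy)
      · intro hx
        rcases pvMem_U.1 hx with ⟨j, hj, hx⟩
        by_cases hjle : j ≤ m + 1
        · exact List.mem_append.2 (Or.inl ((ha x).2 (pvMem_U.2 ⟨j, hjle, hx⟩)))
        · have hj2 : j = m + 2 := by omega
          subst hj2
          rcases List.mem_flatMap.1 hx with ⟨y, hy, hxy⟩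
          have hyU : y ∈ pvU d (m + 1) := pvMem_U.2 ⟨m + 1, le_rfl, hy⟩
          have hyAV : y ∈ pvAV d (m + 1) := (ha y).2 hyU
          have hyne : y ≠ d := by
            intro h
            have := pvLength_mem_M hy
            rw [h] at this
            omega
          have hyt : y ∈ (pvAV d (m + 1)).drop 1 := by
            rw [hhead] at hyAV
            rcases List.mem_cons.1 hyAV with h | h
            · exact absurd h hyne
            · exact h
          exact List.mem_append.2 (Or.inr (List.mem_flatMap.2 ⟨y, hyt, pvMem_geraGaps.2 hxy⟩))
    · rw [hdrop, pvDed_append, pvDed_nil _ (pvU d (m + 1)) htsub, List.nil_append]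
      rw [pvDed_congr (((pvAV d (m + 1)).drop 1).flatMap pvGeraGaps)
          ((pvAV d (m + 1)).drop 1 ++ pvU d (m + 1)) (pvU d (m + 1)) (by
        intro x
        simp only [List.mem_append]
        constructor
        · rintro (hx | hx)
          · exact htsub x hx
          · exact hx
        · exact Or.inr)]
      exact hkey
    · rw [hXdef, pvDed_append, hc]
      rw [pvDed_congr (((pvAV d (m + 1)).drop 1).flatMap pvGeraGaps)
          (pvAV d (m + 1) ++ []) (pvU d (m + 1)) (by
        intro x
        rw [List.append_nil]
        exact ha x)]
      rw [hkey, pvU_succ d (m + 1), pvDed_append]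
      rw [pvDed_congr (pvM d (m + 2)) (pvU d (m + 1) ++ []) (pvU d (m + 1)) (by
        intro x
        rw [List.append_nil])]
      rfl

-- ---- A's port equals (pvDed [] (pvU d n)) mapped ----
theorem pvInnerA (V : List (List Char)) :
    (PySem.List.pyRange 1 (V.length : Int) 1).foldl
      (fun W i => W ++ pvGeraGaps (PySem.List.pyGetD V i [])) V
    = V ++ (V.drop 1).flatMap pvGeraGaps := by
  have h := PySem.List.foldl_pyRange_pyGetD V ([] : List Char)
    (fun W x => W ++ pvGeraGaps x) V (a := 1) (by omega)
  exact h.trans (by rw [PySem.List.foldl_append_eq_flatMap]; rfl)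

theorem pvTop (d : List Char) : ∀ (m : Nat),
    (PySem.List.pyRange 0 ((m : Int) + 1) 1).foldl (fun V k =>
      if k = 0 then V ++ [d]
      else if k = 1 then V ++ pvGeraGaps d
      else
        let nvar : Int := V.length
        (PySem.List.pyRange 1 nvar 1).foldl
          (fun W i => W ++ pvGeraGaps (PySem.List.pyGetD V i [])) V) []
    = pvAV d m := by
  intro m
  induction m with
  | zero =>
    rw [show ((0 : Nat) : Int) + 1 = 0 + 1 from by norm_num]
    rw [PySem.List.pyRange_one_singleton]
    rfl
  | succ m ih =>
    rw [show ((m + 1 : Nat) : Int) + 1 = ((m : Int) + 1) + 1 from by push_cast; ring]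
    rw [PySem.List.pyRange_one_succ_right (by omega), List.foldl_append, ih]
    show (if ((m : Int) + 1) = 0 then pvAV d m ++ [d]
      else if ((m : Int) + 1) = 1 then pvAV d m ++ pvGeraGaps d
      else (PySem.List.pyRange 1 ((pvAV d m).length : Int) 1).foldl
        (fun W i => W ++ pvGeraGaps (PySem.List.pyGetD (pvAV d m) i [])) (pvAV d m)) = pvAV d (m + 1)
    rw [if_neg (by omega)]
    cases m with
    | zero => rw [if_pos (by norm_num)]; rfl
    | succ m' =>
      rw [if_neg (by push_cast; omega), pvInnerA]
      rfl

theorem pvPortA (dna : String) (n : Int) (hn : 0 ≤ n) :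
    gera_n_gaps dna n = (pvDed [] (pvU dna.toList n.toNat)).map String.mk := by
  have h1 := pvTop dna.toList n.toNat
  rw [show ((n.toNat : Int)) = n from Int.toNat_of_nonneg hn] at h1
  show ((((PySem.List.pyRange 0 (n + 1) 1).foldl (fun V k =>
      if k = 0 then V ++ [dna.toList]
      else if k = 1 then V ++ pvGeraGaps dna.toList
      else
        let nvar : Int := V.length
        (PySem.List.pyRange 1 nvar 1).foldl
          (fun W i => W ++ pvGeraGaps (PySem.List.pyGetD V i [])) V) [])).foldl
      (fun acc x => if x ∈ acc then acc else acc ++ [x]) []).map String.mk = _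
  rw [h1, pvFoldl_dedup, List.nil_append]
  refine congrArg _ ?_
  cases hm : n.toNat with
  | zero => rfl
  | succ m => exact (pvA_invariant dna.toList m).2.2.2

-- ---- B's port equals the same ----
theorem pvInnerB (s : List Char) (st : List (List Char) × PySem.Set (List Char) × List (List Char)) :
    (List.range (s.length + 1)).foldl
      (fun st3 i =>
        let t := s.take i ++ '_' :: s.drop i
        if PySem.Set.contains st3.2.1 t then st3
        else (st3.1 ++ [t], PySem.Set.add st3.2.1 t, st3.2.2 ++ [t])) st
    = (pvInsAll s).foldl
      (fun st3 t =>
        if PySem.Set.contains st3.2.1 t then st3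
        else (st3.1 ++ [t], PySem.Set.add st3.2.1 t, st3.2.2 ++ [t])) st := by
  rw [pvInsAll, List.foldl_map]
  rfl

theorem pvSetFold (l : List (List Char)) : ∀ (r sn nx : List (List Char)),
    l.foldl
      (fun st3 t =>
        if PySem.Set.contains st3.2.1 t then st3
        else (st3.1 ++ [t], PySem.Set.add st3.2.1 t, st3.2.2 ++ [t])) (r, sn, nx)
    = (r ++ pvDed sn l, sn ++ pvDed sn l, nx ++ pvDed sn l) := by
  induction l with
  | nil => intro r sn nx; simp [pvDed]
  | cons t l ih =>
    intro r sn nx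
    simp only [List.foldl_cons, pvDed]
    by_cases hm : t ∈ sn
    · rw [show PySem.Set.contains sn t = true from by simp [PySem.Set.contains, hm]]
      rw [if_pos rfl, ih, if_pos hm]
    · rw [show PySem.Set.contains sn t = false from by simp [PySem.Set.contains, hm]]
      rw [if_neg (by simp), if_neg hm]
      rw [show PySem.Set.add sn t = sn ++ [t] from by
        simp [PySem.Set.add, PySem.Set.contains, hm]]
      rw [ih]
      have hcg := pvDed_congr l (sn ++ [t]) (t :: sn)
        (by intro x; simp only [List.mem_append, List.mem_cons]; tauto)
      rw [hcg]
      simp [List.append_assoc]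

theorem pvFrontFold (F : List (List Char)) :
    ∀ (st : List (List Char) × PySem.Set (List Char) × List (List Char)),
    F.foldl
      (fun st2 s =>
        (List.range (s.length + 1)).foldl
          (fun st3 i =>
            let t := s.take i ++ '_' :: s.drop i
            if PySem.Set.contains st3.2.1 t then st3
            else (st3.1 ++ [t], PySem.Set.add st3.2.1 t, st3.2.2 ++ [t])) st2) st
    = (F.flatMap pvInsAll).foldl
      (fun st3 t =>
        if PySem.Set.contains st3.2.1 t then st3
        else (st3.1 ++ [t], PySem.Set.add st3.2.1 t, st3.2.2 ++ [t])) st := by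
  induction F with
  | nil => intro st; rfl
  | cons s F ih =>
    intro st
    rw [List.foldl_cons, List.flatMap_cons, List.foldl_append, pvInnerB, ih]

theorem pvRounds (d : List Char) : ∀ (k : Nat),
    (List.range k).foldl
      (fun (st : List (List Char) × PySem.Set (List Char) × List (List Char)) _ =>
        let (res, seen, frontier) := st
        let (res, seen, next) := frontier.foldl
          (fun st2 s =>
            (List.range (s.length + 1)).foldl
              (fun st3 i =>
                let t := s.take i ++ '_' :: s.drop i
                if PySem.Set.contains st3.2.1 t then st3
                else (st3.1 ++ [t], PySem.Set.add st3.2.1 t, st3.2.2 ++ [t])) st2)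
          (res, seen, ([] : List (List Char)))
        (res, seen, next)) ([d], PySem.Set.ofList [d], [d])
    = (pvDed [] (pvU d k), pvDed [] (pvU d k), pvN d k) := by
  intro k
  induction k with
  | zero => rfl
  | succ k ih =>
    rw [List.range_succ, List.foldl_append, ih, List.foldl_cons, List.foldl_nil]
    show (let (res, seen, next) := (pvN d k).foldl _ (pvDed [] (pvU d k), pvDed [] (pvU d k),
        ([] : List (List Char))); ((res, seen, next) : List (List Char) × PySem.Set (List Char) × List (List Char)))
      = _
    rw [pvFrontFold, pvSetFold]
    have hS : pvDed (pvDed ([] : List (List Char)) (pvU d k)) ((pvN d k).flatMap pvInsAll)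
        = pvN d (k + 1) := by
      rw [pvDed_congr ((pvN d k).flatMap pvInsAll) (pvDed [] (pvU d k)) (pvU d k)
        (by intro x; simp [pvMem_ded]), ← pvN_succ]
    rw [hS]
    have hU : pvDed ([] : List (List Char)) (pvU d k) ++ pvN d (k + 1)
        = pvDed [] (pvU d (k + 1)) := by
      rw [pvU_succ, pvDed_append]
      refine congrArg _ ?_
      rw [pvDed_congr (pvM d (k + 1)) (pvU d k ++ []) (pvU d k) (by intro x; rw [List.append_nil])]
      rfl
    rw [List.nil_append, hU]

theorem pvPortB (dna : String) (n : Int) :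
    gera_n_gaps_alt dna n = (pvDed [] (pvU dna.toList n.toNat)).map String.mk := by
  show (((List.range n.toNat).foldl
      (fun (st : List (List Char) × PySem.Set (List Char) × List (List Char)) _ =>
        let (res, seen, frontier) := st
        let (res, seen, next) := frontier.foldl
          (fun st2 s =>
            (List.range (s.length + 1)).foldl
              (fun st3 i =>
                let t := s.take i ++ '_' :: s.drop i
                if PySem.Set.contains st3.2.1 t then st3
                else (st3.1 ++ [t], PySem.Set.add st3.2.1 t, st3.2.2 ++ [t])) st2)
          (res, seen, ([] : List (List Char)))
        (res, seen, next)) ([dna.toList], PySem.Set.ofList [dna.toList], [dna.toList])).1).map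
      String.mk = _
  rw [pvRounds dna.toList n.toNat]

-- ===== VERDICT (by name: the statement is the Claim_ definition above) =====
theorem gera_n_gaps_spec : Claim_equal_gera_n_gaps := by
  intro dna n _ hpre
  unfold Spec_gera_n_gaps
  rw [pvPortA dna n hpre, pvPortB dna n]
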